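-- pv_equiv track=rewrite | github.com/LSChavarria/Analizador-de-un-lenguaje-de-programacio-Maquina-de-Turing-n | lectura_cinta/leer_cinta.py | separar_cinta
-- ===== SOURCE A (Python) =====
-- from string import ascii_lowercase, digits
--
-- def separar_sub_cinta(contenido, gamma):
--     new_contenido = []
--     aux = ""
--     for i in contenido:
--         if i in ascii_lowercase or i in digits:
--             aux += i
--         else:
--             if aux in gamma:
--                 new_contenido.append(aux)
--             else:
--                 new_contenido += list(aux)
--             aux = ""
--             new_contenido.append(i)
--     return new_contenido
--
-- def separar_cinta(contenido, gamma):
--     new_contenido = []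
--     for i in contenido:
--         if i in gamma:
--             new_contenido.append(i)
--         else:
--             new_contenido += separar_sub_cinta(i, gamma)
--     return new_contenido
-- ===== SOURCE B (Python) =====
-- from string import ascii_lowercase, digits
--
-- _ALNUM = set(ascii_lowercase + digits)
--
-- def separar_cinta(contenido, gamma):
--     new_contenido = []
--     for i in contenido:
--         if i in gamma:
--             new_contenido.append(i)
--         else:
--             s = i
--             while True:
--                 j = 0
--                 while j < len(s) and s[j] in _ALNUM:
--                     j += 1
--                 if j == len(s):
--                     break  # a trailing alphanumeric run yields no token
--                 tok = s[:j]
--                 if tok in gamma: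
--                     new_contenido.append(tok)
--                 else:
--                     new_contenido.extend(tok)
--                 new_contenido.append(s[j])
--                 s = s[j + 1:]
--     return new_contenido
-- ===== Notes on version B (the rewrite author's own statement) =====
-- stated objective: alternative
-- what changed: B repeatedly splits off the maximal alphanumeric prefix and the first separator character of each non-symbol string (takeWhile/dropWhile style with slicing) instead of A's character-by-character loop with a token accumulator.
import Mathlib
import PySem

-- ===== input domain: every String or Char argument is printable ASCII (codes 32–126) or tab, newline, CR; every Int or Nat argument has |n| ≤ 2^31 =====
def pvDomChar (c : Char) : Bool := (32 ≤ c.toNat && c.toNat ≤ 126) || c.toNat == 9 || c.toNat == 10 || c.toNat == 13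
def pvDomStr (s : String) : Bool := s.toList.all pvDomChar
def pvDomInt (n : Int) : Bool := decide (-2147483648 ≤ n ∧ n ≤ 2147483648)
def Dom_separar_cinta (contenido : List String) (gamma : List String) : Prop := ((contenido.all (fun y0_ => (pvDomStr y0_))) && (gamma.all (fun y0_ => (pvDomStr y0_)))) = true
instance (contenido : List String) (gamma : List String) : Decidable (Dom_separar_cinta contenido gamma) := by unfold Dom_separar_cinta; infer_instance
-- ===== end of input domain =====

-- B repeatedly splits off the maximal alphanumeric prefix and the first separator of each
-- non-symbol string, instead of A's character-by-character loop with a token accumulator.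

-- shared module-level constants (Python's string.ascii_lowercase / string.digits)
def pvLowers : List Char := "abcdefghijklmnopqrstuvwxyz".toList
def pvDigits : List Char := "0123456789".toList
def pvSingle (c : Char) : String := String.mk [c]

-- ===== PORT A =====
def pvKeyA (c : Char) : Bool := decide (c ∈ pvLowers) || decide (c ∈ pvDigits)

-- flushing aux: append it as one token if in gamma, else as its characters
def pvFlushA (gamma : List String) (acc : List String) (aux : List Char) : List String :=
  if String.mk aux ∈ gamma then acc ++ [String.mk aux] else acc ++ aux.map pvSingle

-- the for-loop of separar_sub_cinta, state = (new_contenido, aux)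
def pvSubLoop (gamma : List String) : List Char → List String → List Char → List String
  | [], acc, _ => acc
  | c :: cs, acc, aux =>
    if pvKeyA c then pvSubLoop gamma cs acc (aux ++ [c])
    else pvSubLoop gamma cs (pvFlushA gamma acc aux ++ [pvSingle c]) []

def separar_sub_cinta (contenido : String) (gamma : List String) : List String :=
  pvSubLoop gamma contenido.toList [] []

def separar_cinta (contenido : List String) (gamma : List String) : List String :=
  contenido.foldl
    (fun acc i => if i ∈ gamma then acc ++ [i] else acc ++ separar_sub_cinta i gamma) []

-- ===== PORT B =====
-- _ALNUM = set(ascii_lowercase + digits)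
def pvAlnum : PySem.Set Char := PySem.Set.ofList (pvLowers ++ pvDigits)

def pvKeyB (c : Char) : Bool := PySem.Set.contains pvAlnum c

-- B's inner while loop: tok = maximal alnum prefix (s[:j]); if nothing follows it, stop;
-- otherwise emit tok (one token if in gamma, else its chars), emit the separator s[j],
-- and continue with s[j+1:]
def pvSubAlt (gamma : List String) (l : List Char) (out : List String) : List String :=
  match h : l.dropWhile pvKeyB with
  | [] => out
  | c :: rest =>
    pvSubAlt gamma rest
      ((if String.mk (l.takeWhile pvKeyB) ∈ gamma then out ++ [String.mk (l.takeWhile pvKeyB)]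
        else out ++ (l.takeWhile pvKeyB).map pvSingle) ++ [pvSingle c])
termination_by l.length
decreasing_by
  have h1 := List.length_dropWhile_le pvKeyB l
  rw [h] at h1
  simp only [List.length_cons] at h1
  omega

def separar_cinta_alt (contenido : List String) (gamma : List String) : List String :=
  contenido.foldl
    (fun acc i => if i ∈ gamma then acc ++ [i] else pvSubAlt gamma i.toList acc) []

-- ===== PRECONDITION & SPEC =====
def Spec_separar_cinta (contenido : List String) (gamma : List String) (out : List String) : Prop := out = separar_cinta_alt contenido gamma
instance (contenido : List String) (gamma : List String) (out : List String) : Decidable (Spec_separar_cinta contenido gamma out) := by unfold Spec_separar_cinta; infer_instance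

-- ===== CLAIM (what is proved, stated in full; the proofs are below) =====
def Claim_equal_separar_cinta : Prop := ∀ (contenido : List String) (gamma : List String), Dom_separar_cinta contenido gamma → Spec_separar_cinta contenido gamma (separar_cinta contenido gamma)

-- ===== LEMMAS AND PROOFS =====

theorem pvKeyB_eq_pvKeyA : pvKeyB = pvKeyA := by
  funext c
  simp [pvKeyB, pvKeyA, pvAlnum, PySem.Set.contains_eq_listContains,
    PySem.Set.mem_ofList, List.mem_append]

theorem pvSubLoop_cons (gamma : List String) (c : Char) (cs : List Char)
    (acc : List String) (aux : List Char) :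
    pvSubLoop gamma (c :: cs) acc aux =
      if pvKeyA c then pvSubLoop gamma cs acc (aux ++ [c])
      else pvSubLoop gamma cs (pvFlushA gamma acc aux ++ [pvSingle c]) [] := rfl

-- the alphanumeric prefix of the character loop only grows aux
theorem pvSubLoop_alnum (gamma : List String) :
    ∀ (t : List Char), (∀ c ∈ t, pvKeyA c = true) →
    ∀ (l : List Char) (acc : List String) (aux : List Char),
      pvSubLoop gamma (t ++ l) acc aux = pvSubLoop gamma l acc (aux ++ t) := by
  intro t
  induction t with
  | nil => intro _ l acc aux; simp
  | cons c cs ih =>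
    intro h l acc aux
    have hc : pvKeyA c = true := h c (by simp)
    rw [List.cons_append, pvSubLoop_cons, if_pos hc,
      ih (fun x hx => h x (by simp [hx])) l acc (aux ++ [c])]
    simp

-- core equivalence of the two inner algorithms
theorem pvSubAlt_eq_pvSubLoop (gamma : List String) :
    (l : List Char) → (acc : List String) →
      pvSubAlt gamma l acc = pvSubLoop gamma l acc []
  | l, acc => by
    rw [pvSubAlt, pvKeyB_eq_pvKeyA]
    have htall : ∀ x ∈ l.takeWhile pvKeyA, pvKeyA x = true := fun x hx =>
      List.mem_takeWhile_imp hx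
    have hsplit : l.takeWhile pvKeyA ++ l.dropWhile pvKeyA = l :=
      List.takeWhile_append_dropWhile
    cases hr : l.dropWhile pvKeyA with
    | nil =>
      dsimp only
      conv_rhs => rw [← hsplit, hr, List.append_nil]
      have h0 := pvSubLoop_alnum gamma _ htall [] acc []
      simp only [List.append_nil, List.nil_append] at h0
      rw [h0]
      rfl
    | cons c rest =>
      dsimp only
      have hc : pvKeyA c = false := by
        have hhd := List.head?_dropWhile_not pvKeyA l
        rw [hr] at hhd
        simpa using hhd
      rw [pvSubAlt_eq_pvSubLoop gamma rest _]
      conv_rhs => rw [← hsplit, hr]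
      rw [pvSubLoop_alnum gamma _ htall (c :: rest) acc [], pvSubLoop_cons,
        if_neg (show ¬ pvKeyA c = true by simp [hc])]
      simp [pvFlushA]
termination_by l => l.length
decreasing_by
  have h1 := List.length_dropWhile_le pvKeyA l
  rw [hr] at h1
  simp only [List.length_cons] at h1
  omega

-- the character loop only appends to the accumulator
theorem pvSubLoop_append (gamma : List String) :
    ∀ (l : List Char) (a b : List String) (aux : List Char),
      pvSubLoop gamma l (a ++ b) aux = a ++ pvSubLoop gamma l b aux := by
  intro l
  induction l with
  | nil => intro a b aux; rfl
  | cons c cs ih =>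
    intro a b aux
    by_cases hc : pvKeyA c = true
    · rw [pvSubLoop_cons, if_pos hc, pvSubLoop_cons, if_pos hc, ih]
    · have hfa : pvFlushA gamma (a ++ b) aux ++ [pvSingle c]
          = a ++ (pvFlushA gamma b aux ++ [pvSingle c]) := by
        unfold pvFlushA; split_ifs <;> simp
      rw [pvSubLoop_cons, if_neg hc, pvSubLoop_cons, if_neg hc, hfa, ih]

-- ===== VERDICT (by name: the statement is the Claim_ definition above) =====
theorem separar_cinta_spec : Claim_equal_separar_cinta := by
  intro contenido gamma _
  unfold Spec_separar_cinta separar_cinta separar_cinta_alt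
  suffices hgen : ∀ (xs : List String) (acc : List String),
      xs.foldl (fun acc i => if i ∈ gamma then acc ++ [i] else acc ++ separar_sub_cinta i gamma) acc
        = xs.foldl (fun acc i => if i ∈ gamma then acc ++ [i] else pvSubAlt gamma i.toList acc) acc by
    exact hgen contenido []
  intro xs
  induction xs with
  | nil => intro acc; rfl
  | cons x xs ih =>
    intro acc
    simp only [List.foldl_cons]
    by_cases hx : x ∈ gamma
    · simp only [hx, if_pos]; exact ih _
    · simp only [hx, if_false]
      rw [ih]
      congr 1
      rw [pvSubAlt_eq_pvSubLoop gamma]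
      unfold separar_sub_cinta
      have := pvSubLoop_append gamma x.toList acc [] []
      simpa using this.symm
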